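-- pv_equiv track=rewrite | github.com/rareitmeyer/data_science | kaggle/ghouls_goblins_ghosts/model/make_count_models.py | double_pat
-- ===== SOURCE A (Python) =====
-- def double_pat(old_pat, otherletter):
--     def double_or_split(maxi, otherletter):
--         def fn(i, l):
--             if i < maxi:
--                 return 2*l
--             else:
--                 return l+otherletter
--         return fn
--     retval = []
--     for i in range(len(old_pat)):
--         ds = double_or_split(i, otherletter)
--         retval.append(''.join([ds(i,l) for i,l in enumerate(old_pat)]))
--     return retval
-- ===== SOURCE B (Python) =====
-- def double_pat(old_pat, otherletter):
--     n = len(old_pat)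
--     if n == 0:
--         return []
--     # flat buffer for the all-split string: each char followed by otherletter
--     buf = []
--     for c in old_pat:
--         buf.append(c)
--         buf.append(otherletter)
--     out = [''.join(buf)]
--     # successive outputs differ in exactly one slot: pair maxi-1 becomes doubled
--     for maxi in range(1, n):
--         buf[2 * (maxi - 1) + 1] = old_pat[maxi - 1]
--         out.append(''.join(buf))
--     return out
-- ===== Notes on version B (the rewrite author's own statement) =====
-- stated objective: alternative
-- what changed: B keeps one flat mutable buffer of 2n char/otherletter slots representing the all-split string and, for each successive output, flips exactly one slot (pair maxi-1 becomes doubled) and joins it, instead of A's recomputing every string from scratch with a fresh enumerate pass and a j<maxi branch.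
import Mathlib
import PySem

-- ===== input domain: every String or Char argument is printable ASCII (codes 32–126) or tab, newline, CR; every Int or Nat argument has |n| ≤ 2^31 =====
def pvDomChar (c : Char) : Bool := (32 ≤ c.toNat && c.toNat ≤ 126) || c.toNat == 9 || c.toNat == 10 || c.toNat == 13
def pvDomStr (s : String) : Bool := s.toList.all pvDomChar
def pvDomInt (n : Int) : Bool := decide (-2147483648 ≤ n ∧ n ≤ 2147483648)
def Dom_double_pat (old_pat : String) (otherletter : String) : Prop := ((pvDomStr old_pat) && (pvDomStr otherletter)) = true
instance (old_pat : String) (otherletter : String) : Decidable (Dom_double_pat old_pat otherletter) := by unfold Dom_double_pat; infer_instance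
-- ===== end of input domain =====

-- B replaces A's per-index recomputation (a fresh enumerate/join pass with a j<maxi test for every
-- output string) by one mutable flat buffer of char/otherletter slots, flipping exactly one slot per
-- step and joining; objective: alternative decomposition (incremental state instead of recomputation).


-- ===== PORT A =====
-- ds(i, l): Python's 2*l on a 1-char string l is l+l
def pvDsA (maxi : Nat) (other : List Char) (p : Int × Char) : List Char :=
  if p.1 < (maxi : Int) then [p.2, p.2] else p.2 :: other

def double_pat (old_pat : String) (otherletter : String) : List String :=
  (List.range old_pat.toList.length).foldl
    (fun retval maxi =>
      retval ++ [String.mk (((PySem.List.enumerate old_pat.toList 0).map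
        (pvDsA maxi otherletter.toList)).flatten)])
    []

-- ===== PORT B =====
-- one loop step: flip slot 2*(maxi-1)+1 of the buffer to the doubled char, emit the join
def pvStepB (cs : List Char) (st : List (List Char) × List String) (maxi : Nat) :
    List (List Char) × List String :=
  let buf := st.1.set (2 * (maxi - 1) + 1) [cs.getD (maxi - 1) ' ']
  (buf, st.2 ++ [String.mk buf.flatten])

def double_pat_alt (old_pat : String) (otherletter : String) : List String :=
  let cs := old_pat.toList
  if cs.length = 0 then []
  else
    let buf0 := cs.flatMap (fun c => [[c], otherletter.toList])
    ((List.range' 1 (cs.length - 1)).foldl (pvStepB cs)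
      (buf0, [String.mk buf0.flatten])).2

-- ===== PRECONDITION & SPEC =====
def Spec_double_pat (old_pat : String) (otherletter : String) (out : List String) : Prop := out = double_pat_alt old_pat otherletter
instance (old_pat : String) (otherletter : String) (out : List String) : Decidable (Spec_double_pat old_pat otherletter out) := by unfold Spec_double_pat; infer_instance

-- ===== CLAIM (what is proved, stated in full; the proofs are below) =====
def Claim_equal_double_pat : Prop := ∀ (old_pat : String) (otherletter : String), Dom_double_pat old_pat otherletter → Spec_double_pat old_pat otherletter (double_pat old_pat otherletter)

-- ===== LEMMAS AND PROOFS =====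

-- canonical form of output string number k: first k chars doubled, the rest split
def pvStrFor (other : List Char) : List Char → Nat → List Char
  | [], _ => []
  | c :: cs, 0 => (c :: other) ++ pvStrFor other cs 0
  | c :: cs, k + 1 => c :: c :: pvStrFor other cs k

-- canonical form of B's buffer after k flips
def pvMix (other : List Char) : List Char → Nat → List (List Char)
  | [], _ => []
  | c :: cs, 0 => [c] :: other :: pvMix other cs 0
  | c :: cs, k + 1 => [c] :: [c] :: pvMix other cs k

theorem pvMix_flatten (other cs : List Char) (k : Nat) :
    (pvMix other cs k).flatten = pvStrFor other cs k := by
  induction cs generalizing k with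
  | nil => simp [pvMix, pvStrFor]
  | cons c cs ih =>
    cases k <;> simp [pvMix, pvStrFor, ih]

theorem pvMix_zero (other cs : List Char) :
    cs.flatMap (fun c => [[c], other]) = pvMix other cs 0 := by
  induction cs with
  | nil => simp [pvMix]
  | cons c cs ih => simp [pvMix, ih]

theorem pvMix_set (other cs : List Char) (k : Nat) (hk : k < cs.length) :
    (pvMix other cs k).set (2 * k + 1) [cs.getD k ' '] = pvMix other cs (k + 1) := by
  induction cs generalizing k with
  | nil => simp at hk
  | cons c cs ih =>
    cases k with
    | zero => simp [pvMix]
    | succ k =>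
      have h2 : 2 * (k + 1) + 1 = (2 * k + 1) + 2 := by ring
      simp only [pvMix, h2, List.set_cons_succ, List.getD_cons_succ]
      rw [ih k (by simpa using hk)]

theorem pvEnum_flatten (other cs : List Char) (s : Int) (m : Int) :
    ((PySem.List.enumerate cs s).map
      (fun p => if p.1 < m then [p.2, p.2] else p.2 :: other)).flatten
      = pvStrFor other cs (m - s).toNat := by
  induction cs generalizing s with
  | nil => simp [PySem.List.enumerate_nil, pvStrFor]
  | cons c cs ih =>
    rw [PySem.List.enumerate_cons]
    by_cases h : s < m
    · have h1 : (m - s).toNat = (m - (s + 1)).toNat + 1 := by omega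
      simp [h, ih, h1, pvStrFor]
    · have h1 : (m - s).toNat = 0 := by omega
      have h2 : (m - (s + 1)).toNat = 0 := by omega
      simp [h, ih, h1, h2, pvStrFor]

theorem pvA_elem (other cs : List Char) (maxi : Nat) :
    ((PySem.List.enumerate cs 0).map (pvDsA maxi other)).flatten
      = pvStrFor other cs maxi := by
  have := pvEnum_flatten other cs 0 (maxi : Int)
  simpa [pvDsA] using this

-- A's loop appends the canonical strings in order
theorem pvA_eq (old_pat otherletter : String) :
    double_pat old_pat otherletter
      = (List.range old_pat.toList.length).map
          (fun k => String.mk (pvStrFor otherletter.toList old_pat.toList k)) := by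
  unfold double_pat
  rw [PySem.List.foldl_append_singleton_eq_map]
  simp [pvA_elem]

-- B's fold invariant: starting from buffer state k, processing maxis k+1 .. k+m
theorem pvB_fold (cs other : List Char) (m k : Nat) (acc : List String)
    (hkm : k + m ≤ cs.length) :
    (List.range' (k + 1) m).foldl (pvStepB cs) (pvMix other cs k, acc)
      = (pvMix other cs (k + m),
         acc ++ (List.range' (k + 1) m).map
           (fun j => String.mk (pvStrFor other cs j))) := by
  induction m generalizing k acc with
  | zero => simp
  | succ m ih =>
    rw [List.range'_succ]
    simp only [List.foldl_cons]
    have hk : k < cs.length := by omega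
    have hstep : pvStepB cs (pvMix other cs k, acc) (k + 1)
        = (pvMix other cs (k + 1), acc ++ [String.mk (pvStrFor other cs (k + 1))]) := by
      simp only [pvStepB]
      have : k + 1 - 1 = k := by omega
      rw [this, pvMix_set other cs k hk, pvMix_flatten]
    rw [hstep, show k + 1 + 1 = (k + 1) + 1 from rfl, ih (k + 1) _ (by omega)]
    rw [Prod.mk.injEq]
    refine ⟨by congr 1; omega, ?_⟩
    simp [List.append_assoc]

-- ===== VERDICT (by name: the statement is the Claim_ definition above) =====
theorem double_pat_spec : Claim_equal_double_pat := by
  intro old_pat otherletter _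
  unfold Spec_double_pat
  rw [pvA_eq]
  unfold double_pat_alt
  set cs := old_pat.toList with hcs
  by_cases h0 : cs.length = 0
  · simp [h0]
  · simp only [h0, if_false]
    obtain ⟨n, hn⟩ : ∃ n, cs.length = n + 1 := ⟨cs.length - 1, by omega⟩
    rw [pvMix_zero, pvMix_flatten]
    have := pvB_fold cs otherletter.toList (cs.length - 1) 0
      [String.mk (pvStrFor otherletter.toList cs 0)] (by omega)
    simp only [Nat.zero_add] at this
    rw [this]
    rw [hn, List.range_eq_range', List.range'_succ, List.map_cons]
    simp
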